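-- pv_equiv track=rewrite | github.com/ilyadmnezaydo-stack/tgbot_naura | src/services/contact_enrichment.py | _dedupe_tags
-- ===== SOURCE A (Python) =====
-- def _normalize_tag(tag: str) -> str:
--     cleaned = tag.lstrip("#").strip().lower()
--     return f"#{cleaned}" if cleaned else ""
--
-- def _dedupe_tags(tags: list[str]) -> list[str]:
--     result: list[str] = []
--     seen: set[str] = set()
--     for tag in tags:
--         normalized = _normalize_tag(tag)
--         if not normalized or normalized in seen:
--             continue
--         seen.add(normalized)
--         result.append(normalized)
--         if len(result) >= 5:
--             break
--     return result
-- ===== SOURCE B (Python) =====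
-- def _normalize_tag(tag: str) -> str:
--     cleaned = tag.lstrip("#").strip().lower()
--     return f"#{cleaned}" if cleaned else ""
--
-- def _dedupe_tags(tags: list[str]) -> list[str]:
--     norms = [n for n in (_normalize_tag(t) for t in tags) if n]
--
--     def pick(xs: list[str], budget: int) -> list[str]:
--         if not xs or budget == 0:
--             return []
--         head = xs[0]
--         return [head] + pick([x for x in xs[1:] if x != head], budget - 1)
--
--     return pick(norms, 5)
-- ===== Notes on version B (the rewrite author's own statement) =====
-- stated objective: alternative
-- what changed: Replaces A's single pass with a seen-set, accumulator and early break by a two-stage scheme: first build the list of nonempty normalized tags, then select distinct tags recursively by taking the head and filtering all its later occurrences out of the tail (no seen set), with a budget of 5.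
import Mathlib
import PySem

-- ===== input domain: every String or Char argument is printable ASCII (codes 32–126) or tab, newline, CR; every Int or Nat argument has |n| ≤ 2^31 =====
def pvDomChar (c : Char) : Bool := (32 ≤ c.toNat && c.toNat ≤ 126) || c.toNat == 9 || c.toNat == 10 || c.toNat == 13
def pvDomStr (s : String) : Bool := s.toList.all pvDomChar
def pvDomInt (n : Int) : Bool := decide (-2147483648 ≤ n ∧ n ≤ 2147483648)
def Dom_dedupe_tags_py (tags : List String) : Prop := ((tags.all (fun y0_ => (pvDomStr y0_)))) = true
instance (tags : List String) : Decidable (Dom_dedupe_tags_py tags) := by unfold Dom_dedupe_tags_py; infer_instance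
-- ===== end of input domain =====

-- B replaces A's one-pass seen-set/early-break loop by a two-stage scheme: build the nonempty
-- normalized tags, then recursively take the head and filter its duplicates out of the tail,
-- with a budget of 5 (alternative decomposition; no seen set).


-- ===== PORT A =====
-- shared module helper _normalize_tag; tag.lstrip("#") ported by hand as dropWhile (== '#'),
-- exact: Python's lstrip(chars) removes exactly the leading characters drawn from chars.
def normTag (tag : String) : String :=
  let cleaned := PySem.Chars.lower (PySem.Chars.strip (tag.toList.dropWhile (· == '#')))
  if cleaned = [] then "" else String.ofList ('#' :: cleaned)

def dedupeLoopA : List String → List String → PySem.Set String → List String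
  | [], result, _ => result
  | tag :: rest, result, seen =>
    let normalized := normTag tag
    if normalized == "" || PySem.Set.contains seen normalized then
      dedupeLoopA rest result seen
    else
      let result' := result ++ [normalized]
      let seen' := PySem.Set.add seen normalized
      if result'.length ≥ 5 then result' else dedupeLoopA rest result' seen'

def dedupe_tags_py (tags : List String) : List String :=
  dedupeLoopA tags [] PySem.Set.empty

-- ===== PORT B =====
-- pick(xs, budget): take the head, filter its later occurrences out of the tail, recurse
def pickB : List String → Nat → List String
  | [], _ => []
  | _ :: _, 0 => []
  | h :: t, Nat.succ k => h :: pickB (t.filter (fun x => x != h)) k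

def dedupe_tags_py_alt (tags : List String) : List String :=
  pickB ((tags.map normTag).filter (fun n => !(n == ""))) 5

-- ===== PRECONDITION & SPEC =====
def Spec_dedupe_tags_py (tags : List String) (out : List String) : Prop := out = dedupe_tags_py_alt tags
instance (tags : List String) (out : List String) : Decidable (Spec_dedupe_tags_py tags out) := by unfold Spec_dedupe_tags_py; infer_instance

-- ===== CLAIM (what is proved, stated in full; the proofs are below) =====
def Claim_equal_dedupe_tags_py : Prop := ∀ (tags : List String), Dom_dedupe_tags_py tags → Spec_dedupe_tags_py tags (dedupe_tags_py tags)

-- ===== LEMMAS AND PROOFS =====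

-- A's result without the budget: dedup of the nonempty normalized tags relative to `seen`
def pdd : List String → PySem.Set String → List String
  | [], _ => []
  | tag :: rest, seen =>
    let n := normTag tag
    if n == "" || PySem.Set.contains seen n then pdd rest seen
    else n :: pdd rest (PySem.Set.add seen n)

-- dedup of a list of strings relative to a seen set, seen-set style
def sdd : List String → PySem.Set String → List String
  | [], _ => []
  | x :: xs, seen =>
    if PySem.Set.contains seen x then sdd xs seen
    else x :: sdd xs (PySem.Set.add seen x)

-- budget-free version of B's tail-filtering dedup
def dedupF : List String → List String
  | [] => []
  | h :: t => h :: dedupF (t.filter (fun x => x != h))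
termination_by xs => xs.length
decreasing_by
  simp only [List.length_unattach, List.length_cons]
  exact Nat.lt_succ_of_le (le_trans (List.length_filter_le _ _) (le_of_eq (List.length_attach)))

theorem loopA_eq_pdd (ts : List String) : ∀ (result : List String) (seen : PySem.Set String),
    result.length < 5 →
    dedupeLoopA ts result seen = result ++ (pdd ts seen).take (5 - result.length) := by
  induction ts with
  | nil => intro result seen _; simp [dedupeLoopA, pdd]
  | cons tag rest ih =>
    intro result seen hlt
    by_cases hc : (normTag tag == "" || PySem.Set.contains seen (normTag tag)) = true
    · simp only [dedupeLoopA, pdd, hc, if_pos]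
      exact ih result seen hlt
    · simp only [dedupeLoopA, pdd, hc, if_neg, Bool.not_eq_true]
      by_cases hfull : (result ++ [normTag tag]).length ≥ 5
      · have hlen : result.length = 4 := by simp at hfull; omega
        have h1 : 5 - result.length = 1 := by omega
        rw [if_pos hfull, h1]
        simp
      · rw [if_neg hfull, ih (result ++ [normTag tag]) _ (by simp at hfull ⊢; omega)]
        have : 5 - (result ++ [normTag tag]).length = 5 - result.length - 1 := by
          simp; omega
        rw [this]
        have h2 : 5 - result.length = (5 - result.length - 1) + 1 := by omega
        rw [h2, List.take_succ_cons]
        simp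

theorem pdd_eq_sdd (ts : List String) : ∀ (seen : PySem.Set String),
    pdd ts seen = sdd ((ts.map normTag).filter (fun n => !(n == ""))) seen := by
  induction ts with
  | nil => intro seen; simp [pdd, sdd]
  | cons tag rest ih =>
    intro seen
    by_cases he : (normTag tag == "") = true
    · simp only [pdd, List.map_cons, List.filter_cons, he, Bool.not_true,
        Bool.true_or, if_pos, Bool.false_eq_true, if_neg, not_false_iff]
      exact ih seen
    · simp only [pdd, List.map_cons, List.filter_cons, he, Bool.not_false, if_pos, sdd]
      by_cases hm : PySem.Set.contains seen (normTag tag) = true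
      · simp only [hm, Bool.or_true, if_pos]
        exact ih seen
      · simp only [hm, Bool.or_false, Bool.false_eq_true, not_false_iff, if_neg]
        rw [ih (PySem.Set.add seen (normTag tag))]

theorem dedupF_nil : dedupF [] = [] := by simp [dedupF]

theorem dedupF_cons (h : String) (t : List String) :
    dedupF (h :: t) = h :: dedupF (t.filter (fun x => x != h)) := by simp [dedupF]

theorem dedupF_filter_eq_sdd (xs : List String) : ∀ (seen : PySem.Set String),
    dedupF (xs.filter (fun x => !(PySem.Set.contains seen x))) = sdd xs seen := by
  induction xs with
  | nil => intro seen; simp [dedupF_nil, sdd]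
  | cons x xs ih =>
    intro seen
    by_cases hm : PySem.Set.contains seen x = true
    · simp only [List.filter_cons, hm, Bool.not_true, Bool.false_eq_true, if_neg,
        not_false_iff, sdd, if_pos]
      exact ih seen
    · have hm' : x ∉ seen := by simpa [PySem.Set.contains] using hm
      have hadd : PySem.Set.add seen x = seen ++ [x] := by simp [PySem.Set.add, hm']
      simp only [List.filter_cons, hm, Bool.not_false, if_pos, sdd,
        Bool.false_eq_true, not_false_iff, if_neg]
      rw [dedupF_cons, ← ih (PySem.Set.add seen x), List.filter_filter]
      congr 1
      apply congrArg dedupF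
      apply List.filter_congr
      intro y _
      by_cases hxy : y = x
      · subst hxy; simp [hadd, PySem.Set.contains]
      · simp [hadd, PySem.Set.contains, hxy, bne]

theorem pickB_eq_take_dedupF (k : Nat) : ∀ (xs : List String),
    pickB xs k = (dedupF xs).take k := by
  induction k with
  | zero => intro xs; cases xs <;> simp [pickB]
  | succ k ih =>
    intro xs
    cases xs with
    | nil => simp [pickB, dedupF_nil]
    | cons h t => rw [dedupF_cons, List.take_succ_cons]; simp only [pickB, ih]

-- ===== VERDICT (by name: the statement is the Claim_ definition above) =====
theorem dedupe_tags_py_spec : Claim_equal_dedupe_tags_py := by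
  intro tags _
  show dedupe_tags_py tags = dedupe_tags_py_alt tags
  unfold dedupe_tags_py dedupe_tags_py_alt
  rw [loopA_eq_pdd tags [] PySem.Set.empty (by norm_num), pdd_eq_sdd,
    ← dedupF_filter_eq_sdd, pickB_eq_take_dedupF]
  have : ∀ (ys : List String), ys.filter (fun x => !(PySem.Set.contains PySem.Set.empty x)) = ys := by
    intro ys; apply List.filter_eq_self.mpr; intro y _; simp [PySem.Set.contains, PySem.Set.empty]
  rw [this]
  simp
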